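-- pv_equiv track=rewrite | github.com/squishyjs/daily-solve | Python/advitiya.py | solve
-- ===== SOURCE A (Python) =====
-- def convert_char_cyclic(char: str) -> str:
--     dictionary = {
--         "A": "B",
--         "B": "C",
--         "C": "D",
--         "D": "E",
--         "E": "F",
--         "F": "G",
--         "G": "H",
--         "H": "I",
--         "I": "J",
--         "J": "K",
--         "K": "L",
--         "L": "M",
--         "M": "N",
--         "N": "O",
--         "O": "P",
--         "P": "Q",
--         "Q": "R",
--         "R": "S",
--         "S": "T",
--         "T": "U",
--         "U": "V",
--         "V": "W",
--         "W": "X",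
--         "X": "Y",
--         "Y": "Z",
--         "Z": "A"
--     }
--
--     return dictionary[char]
--
-- def solve(advitiya: str) -> int:
--     MATCH_STRING = "ADVITIYA"
--
--     count: int = 0
--     for i in range(len(MATCH_STRING)):
--         curr_char = advitiya[i].upper()
--         if curr_char != MATCH_STRING[i]:
--             corr_char = MATCH_STRING[i]
--             while curr_char != corr_char:
--                 count += 1
--                 curr_char = convert_char_cyclic(curr_char)
--
--     return count
-- ===== SOURCE B (Python) =====
-- def solve(advitiya: str) -> int:
--     MATCH_STRING = "ADVITIYA"
--     count = 0
--     for i in range(len(MATCH_STRING)):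
--         c = advitiya[i].upper()
--         count += (ord(MATCH_STRING[i]) - ord(c)) % 26
--     return count
-- ===== Notes on version B (the rewrite author's own statement) =====
-- stated objective: simpler
-- what changed: Replaces the inner while-loop that steps one letter at a time through a 26-entry successor dictionary with a single modular-distance computation (ord(target) - ord(char)) % 26 per position.
import Mathlib
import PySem

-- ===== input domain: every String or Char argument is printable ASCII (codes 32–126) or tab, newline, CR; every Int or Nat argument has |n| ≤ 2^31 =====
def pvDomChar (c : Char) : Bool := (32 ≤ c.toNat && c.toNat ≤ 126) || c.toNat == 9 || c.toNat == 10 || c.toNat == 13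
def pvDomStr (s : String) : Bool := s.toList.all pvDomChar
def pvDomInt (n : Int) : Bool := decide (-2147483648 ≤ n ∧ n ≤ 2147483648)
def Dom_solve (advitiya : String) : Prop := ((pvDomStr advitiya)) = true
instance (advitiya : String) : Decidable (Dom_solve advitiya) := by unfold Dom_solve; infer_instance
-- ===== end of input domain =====

-- B replaces A's per-letter stepping through a 26-entry successor dictionary by one
-- modular-distance computation per position (simpler; same cost class).


-- ===== PORT A =====
-- convert_char_cyclic's dict literal (26 entries, in source order)
def cyclicDict : PySem.Dict Char Char := PySem.Dict.ofList
  [('A','B'),('B','C'),('C','D'),('D','E'),('E','F'),('F','G'),('G','H'),('H','I'),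
   ('I','J'),('J','K'),('K','L'),('L','M'),('M','N'),('N','O'),('O','P'),('P','Q'),
   ('Q','R'),('R','S'),('S','T'),('T','U'),('U','V'),('V','W'),('W','X'),('X','Y'),
   ('Y','Z'),('Z','A')]

-- dictionary[char]; none = KeyError
def convertCharCyclic (c : Char) : Option Char := cyclicDict.get? c

-- the inner 'while curr_char != corr_char' loop; fuel 26 suffices because the cycle has
-- length 26 (under Pre_ the loop takes at most 25 steps); the none branch is Python's
-- KeyError, excluded by Pre_
def solveLoop : Nat → Char → Char → Int → Int
  | 0, _, _, count => count
  | fuel + 1, curr, corr, count =>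
    if curr ≠ corr then
      match convertCharCyclic curr with
      | some nxt => solveLoop fuel nxt corr (count + 1)
      | none => count + 1
    else count

def solve (advitiya : String) : Int :=
  (PySem.List.pyRange 0 (PySem.Str.len "ADVITIYA") 1).foldl
    (fun count i =>
      let curr := ((PySem.Str.pyGet? advitiya i).getD ' ').toUpper
      let corr := (PySem.Str.pyGet? "ADVITIYA" i).getD ' '
      if curr ≠ corr then solveLoop 26 curr corr count else count) 0

-- ===== PORT B =====
def solve_alt (advitiya : String) : Int :=
  (PySem.List.pyRange 0 (PySem.Str.len "ADVITIYA") 1).foldl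
    (fun count i =>
      let c := ((PySem.Str.pyGet? advitiya i).getD ' ').toUpper
      count + PySem.Int.mod
        ((((PySem.Str.pyGet? "ADVITIYA" i).getD ' ').toNat : Int) - (c.toNat : Int)) 26) 0

-- ===== PRECONDITION & SPEC =====
-- Pre_ excludes the inputs on which A raises: strings shorter than 8 (IndexError) and
-- strings whose first 8 characters are not all ASCII letters (KeyError on a mismatched
-- non-letter).
def Pre_solve (advitiya : String) : Prop :=
  8 ≤ advitiya.toList.length ∧ (advitiya.toList.take 8).all Char.isAlpha = true
instance (advitiya : String) : Decidable (Pre_solve advitiya) := by unfold Pre_solve; infer_instance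

def pvWitness_solve : String := "advitiya"

def Spec_solve (advitiya : String) (out : Int) : Prop := out = solve_alt advitiya
instance (advitiya : String) (out : Int) : Decidable (Spec_solve advitiya out) := by unfold Spec_solve; infer_instance

-- ===== CLAIM (what is proved, stated in full; the proofs are below) =====
def Claim_equal_solve : Prop := ∀ (advitiya : String), Dom_solve advitiya → Pre_solve advitiya → Spec_solve advitiya (solve advitiya)

-- ===== LEMMAS AND PROOFS =====

def upperList : List Char :=
  ['A','B','C','D','E','F','G','H','I','J','K','L','M','N','O','P','Q','R','S','T','U','V','W','X','Y','Z']

def targetList : List Char := ['A','D','V','I','T','I','Y','A']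

-- the loop only adds to its accumulator
lemma solveLoop_shift (fuel : Nat) (u t : Char) (count : Int) :
    solveLoop fuel u t count = count + solveLoop fuel u t 0 := by
  induction fuel generalizing u count with
  | zero => simp [solveLoop]
  | succ n ih =>
    simp only [solveLoop]
    split
    · cases h : convertCharCyclic u with
      | none => simp
      | some v =>
        dsimp only
        rw [ih v (count + 1), ih v (0 + 1)]
        ring
    · simp

-- core fact: for every uppercase letter and every target letter, the stepping loop
-- computes the cyclic modular distance (checked by computation, Bool form)
set_option maxRecDepth 8000 in
lemma core_bool : (upperList.all (fun u => targetList.all (fun t =>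
    decide ((if u ≠ t then solveLoop 26 u t 0 else (0:Int))
      = PySem.Int.mod ((t.toNat : Int) - (u.toNat : Int)) 26)))) = true := by decide

lemma core_eq : ∀ u ∈ upperList, ∀ t ∈ targetList,
    (if u ≠ t then solveLoop 26 u t 0 else (0:Int))
      = PySem.Int.mod ((t.toNat : Int) - (u.toNat : Int)) 26 := by
  have h := core_bool
  simp only [List.all_eq_true, decide_eq_true_eq] at h
  exact h

lemma toUpper_mem (c : Char) (hc : c.isAlpha = true) : c.toUpper ∈ upperList := by
  have hb : (65 ≤ c.toNat ∧ c.toNat ≤ 90) ∨ (97 ≤ c.toNat ∧ c.toNat ≤ 122) := by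
    simp [Char.isAlpha, Char.isUpper, Char.isLower] at hc
    rcases hc with ⟨h1, h2⟩ | ⟨h1, h2⟩
    · exact Or.inl ⟨h1, h2⟩
    · exact Or.inr ⟨h1, h2⟩
  rw [← Char.ofNat_toNat c]
  rcases hb with ⟨h1, h2⟩ | ⟨h1, h2⟩ <;>
    · interval_cases h : c.toNat <;> decide

-- one position of the fold: A's conditional stepping loop equals B's modular distance
lemma pos_eq (c t : Char) (hc : c.isAlpha = true) (ht : t ∈ targetList) (count : Int) :
    (if c.toUpper ≠ t then solveLoop 26 c.toUpper t count else count)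
      = count + PySem.Int.mod ((t.toNat : Int) - (c.toUpper.toNat : Int)) 26 := by
  have h := core_eq c.toUpper (toUpper_mem c hc) t ht
  rw [← h]
  split
  · exact solveLoop_shift 26 c.toUpper t count
  · ring

lemma target_toList : "ADVITIYA".toList = targetList := by decide

lemma fold_eq (advitiya : String) (h8 : 8 ≤ advitiya.toList.length)
    (halpha : ∀ c ∈ advitiya.toList.take 8, c.isAlpha = true) :
    ∀ (l : List Int), (∀ i ∈ l, 0 ≤ i ∧ i < 8) → ∀ count : Int,
      l.foldl (fun count i =>
          let curr := ((PySem.Str.pyGet? advitiya i).getD ' ').toUpper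
          let corr := (PySem.Str.pyGet? "ADVITIYA" i).getD ' '
          if curr ≠ corr then solveLoop 26 curr corr count else count) count
      = l.foldl (fun count i =>
          let c := ((PySem.Str.pyGet? advitiya i).getD ' ').toUpper
          count + PySem.Int.mod
            ((((PySem.Str.pyGet? "ADVITIYA" i).getD ' ').toNat : Int) - (c.toNat : Int)) 26) count := by
  intro l
  induction l with
  | nil => intro _ _; rfl
  | cons i rest ih =>
    intro hmem count
    have hi := hmem i (List.mem_cons_self ..)
    have hnat : i = ((i.toNat : Nat) : Int) := (Int.toNat_of_nonneg hi.1).symm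
    have hi8 : i.toNat < 8 := by omega
    have hilen : i.toNat < advitiya.toList.length := by omega
    -- the source character is one of the first 8, hence a letter
    have ht1 : i.toNat < targetList.length := by simp only [targetList]; simp; omega
    -- the source character is one of the first 8, hence a letter
    have hcget : PySem.Str.pyGet? advitiya i = advitiya.toList[i.toNat]? := by
      conv_lhs => rw [hnat]
      exact PySem.Str.pyGet?_natCast ..
    have hcget' : PySem.Str.pyGet? advitiya i = some (advitiya.toList[i.toNat]) := by
      rw [hcget]; exact List.getElem?_eq_getElem hilen
    have hcmem : advitiya.toList[i.toNat] ∈ advitiya.toList.take 8 := by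
      have h1 : i.toNat < (advitiya.toList.take 8).length := by
        simp only [List.length_take]; omega
      have h2 : (advitiya.toList.take 8)[i.toNat]'h1 = advitiya.toList[i.toNat] :=
        List.getElem_take
      exact h2 ▸ List.getElem_mem h1
    have hcalpha : (advitiya.toList[i.toNat]).isAlpha = true := halpha _ hcmem
    -- the target character is one of targetList
    have htget : PySem.Str.pyGet? "ADVITIYA" i = some (targetList[i.toNat]'ht1) := by
      have : PySem.Str.pyGet? "ADVITIYA" i = "ADVITIYA".toList[i.toNat]? := by
        conv_lhs => rw [hnat]
        exact PySem.Str.pyGet?_natCast ..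
      rw [this, target_toList]
      exact List.getElem?_eq_getElem ht1
    have htmem : targetList[i.toNat]'ht1 ∈ targetList := List.getElem_mem ht1
    simp only [List.foldl_cons, hcget', htget, Option.getD_some]
    rw [pos_eq _ _ hcalpha htmem]
    exact ih (fun j hj => hmem j (List.mem_cons_of_mem _ hj)) _

lemma range_bounds : ∀ i ∈ PySem.List.pyRange 0 (PySem.Str.len "ADVITIYA") 1, 0 ≤ i ∧ i < 8 := by
  decide

-- ===== VERDICT (by name: the statements are the Claim_ definitions above) =====
theorem solve_spec : Claim_equal_solve := by
  intro advitiya _ ⟨h8, halpha⟩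
  unfold Spec_solve solve solve_alt
  exact fold_eq advitiya h8 (fun c hc => List.all_eq_true.mp halpha c hc) _ range_bounds 0
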